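-- pv_equiv track=rewrite | github.com/tavroi/epass-appointment | Utils/validate.py | compare_details
-- ===== SOURCE A (Python) =====
-- def compare_details(dict1, dict2, keys):
--     differences = {}
--     for key in keys:
--         if key in dict1 and key in dict2:
--             if dict1[key] != dict2[key]:
--                 differences[key] = {'from': dict1[key], 'to': dict2[key]}
--         elif key in dict1:
--             differences[key] = {'from': dict1[key], 'to': None}
--         elif key in dict2:
--             differences[key] = {'from': None, 'to': dict2[key]}
--
--     if differences=={}:
--         return True
--     else:
--         return False
-- ===== SOURCE B (Python) =====
-- def compare_details(dict1, dict2, keys):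
--     # Restrict each dict to the requested keys (in key order) and compare the
--     # two projections wholesale; no per-key boolean test, no diff accumulation.
--     proj1 = [(k, dict1[k]) for k in keys if k in dict1]
--     proj2 = [(k, dict2[k]) for k in keys if k in dict2]
--     return proj1 == proj2
-- ===== Notes on version B (the rewrite author's own statement) =====
-- stated objective: alternative
-- what changed: B builds the restriction of each dict to the key list as a projected association list and compares the two projections wholesale, instead of accumulating a structured diff dict per key and testing it for emptiness.
import Mathlib
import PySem

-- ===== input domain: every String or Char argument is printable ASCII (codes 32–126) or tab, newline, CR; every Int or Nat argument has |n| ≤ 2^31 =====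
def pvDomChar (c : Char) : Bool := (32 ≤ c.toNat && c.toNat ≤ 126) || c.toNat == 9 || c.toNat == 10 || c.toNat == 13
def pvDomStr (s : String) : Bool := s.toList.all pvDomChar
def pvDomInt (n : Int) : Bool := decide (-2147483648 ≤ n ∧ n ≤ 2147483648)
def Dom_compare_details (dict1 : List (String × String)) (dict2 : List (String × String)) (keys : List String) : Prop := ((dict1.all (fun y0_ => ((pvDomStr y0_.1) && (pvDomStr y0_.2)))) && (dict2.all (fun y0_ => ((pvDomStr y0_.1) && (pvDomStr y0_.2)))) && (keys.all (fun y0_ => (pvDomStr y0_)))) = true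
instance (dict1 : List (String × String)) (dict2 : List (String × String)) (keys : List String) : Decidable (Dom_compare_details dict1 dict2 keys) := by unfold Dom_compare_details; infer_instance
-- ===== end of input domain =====

-- B restricts each dict to the key list and compares the two projected association lists wholesale
-- (no per-key test, no diff accumulation): a genuinely different decomposition of the same task.
-- ===== PORT A =====
def compare_details (dict1 : List (String × String)) (dict2 : List (String × String)) (keys : List String) : Bool :=
  let d1 : PySem.Dict String String := PySem.Dict.mk dict1
  let d2 : PySem.Dict String String := PySem.Dict.mk dict2
  let differences : PySem.Dict String (Option String × Option String) :=
    keys.foldl (fun acc key =>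
      if d1.contains key && d2.contains key then
        if d1.get? key != d2.get? key then
          acc.insert key (d1.get? key, d2.get? key)
        else acc
      else if d1.contains key then
        acc.insert key (d1.get? key, none)
      else if d2.contains key then
        acc.insert key (none, d2.get? key)
      else acc) PySem.Dict.empty
  if differences = PySem.Dict.empty then true else false

-- ===== PORT B =====
def compare_details_alt (dict1 : List (String × String)) (dict2 : List (String × String)) (keys : List String) : Bool :=
  let d1 : PySem.Dict String String := PySem.Dict.mk dict1
  let d2 : PySem.Dict String String := PySem.Dict.mk dict2
  let proj1 : List (String × Option String) :=
    (keys.filter (fun k => d1.contains k)).map (fun k => (k, d1.get? k))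
  let proj2 : List (String × Option String) :=
    (keys.filter (fun k => d2.contains k)).map (fun k => (k, d2.get? k))
  proj1 == proj2

-- ===== PRECONDITION & SPEC =====
def Spec_compare_details (dict1 : List (String × String)) (dict2 : List (String × String)) (keys : List String) (out : Bool) : Prop := out = compare_details_alt dict1 dict2 keys
instance (dict1 : List (String × String)) (dict2 : List (String × String)) (keys : List String) (out : Bool) : Decidable (Spec_compare_details dict1 dict2 keys out) := by unfold Spec_compare_details; infer_instance

-- ===== CLAIM =====
def Claim_equal_compare_details : Prop := ∀ (dict1 : List (String × String)) (dict2 : List (String × String)) (keys : List String), Dom_compare_details dict1 dict2 keys → Spec_compare_details dict1 dict2 keys (compare_details dict1 dict2 keys)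

-- ===== LEMMAS AND PROOFS =====

theorem pv_insert_ne_empty {κ ν : Type} [BEq κ] (d : PySem.Dict κ ν) (k : κ) (v : ν) :
    d.insert k v ≠ PySem.Dict.empty := by
  intro h
  have hitems : (d.insert k v).items = [] := by rw [h]; rfl
  rcases hc : d.contains k with _ | _
  · simp [PySem.Dict.items_insert, hc] at hitems
  · simp [PySem.Dict.items_insert, hc] at hitems
    simp [PySem.Dict.contains, hitems] at hc

-- A's fold yields the empty diff dict iff every key matches in presence and value.
theorem pv_fold_eq_empty_iff (d1 d2 : PySem.Dict String String) (keys : List String)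
    (acc : PySem.Dict String (Option String × Option String)) :
    (keys.foldl (fun acc key =>
      if d1.contains key && d2.contains key then
        if d1.get? key != d2.get? key then
          acc.insert key (d1.get? key, d2.get? key)
        else acc
      else if d1.contains key then
        acc.insert key (d1.get? key, none)
      else if d2.contains key then
        acc.insert key (none, d2.get? key)
      else acc) acc = PySem.Dict.empty)
    ↔ (acc = PySem.Dict.empty ∧ keys.all (fun key =>
        (d1.contains key == d2.contains key)
        && (!d1.contains key || d1.get? key == d2.get? key)) = true) := by
  induction keys generalizing acc with
  | nil => simp
  | cons k ks ih =>
    rw [List.foldl_cons, ih, List.all_cons]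
    rcases h1 : d1.contains k with _ | _ <;> rcases h2 : d2.contains k with _ | _
    · simp
    · simp [pv_insert_ne_empty]
    · simp [pv_insert_ne_empty]
    · by_cases hv : d1.get? k = d2.get? k
      · simp [hv]
      · simp [hv, pv_insert_ne_empty]

-- B's two projections are equal iff every key matches in presence and value.
theorem pv_proj_eq_iff (d1 d2 : PySem.Dict String String) (keys : List String) :
    ((keys.filter (fun k => d1.contains k)).map (fun k => (k, d1.get? k))
      = (keys.filter (fun k => d2.contains k)).map (fun k => (k, d2.get? k)))
    ↔ keys.all (fun key =>
        (d1.contains key == d2.contains key)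
        && (!d1.contains key || d1.get? key == d2.get? key)) = true := by
  induction keys with
  | nil => simp
  | cons k ks ih =>
    rw [List.all_cons]
    rcases h1 : d1.contains k with _ | _ <;> rcases h2 : d2.contains k with _ | _
    · simp [h1, h2, ih]
    · -- k only in d2: the right projection starts with (k, _), the left cannot contain k
      simp only [List.filter_cons, h1, h2, if_pos, if_neg, Bool.false_eq_true,
        not_false_iff, List.map_cons]
      constructor
      · intro he
        have hk : (k, d2.get? k) ∈ (ks.filter (fun k => d1.contains k)).map (fun k => (k, d1.get? k)) := by
          rw [he]; exact List.mem_cons_self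
        rcases List.mem_map.mp hk with ⟨k', hk', hpair⟩
        have : d1.contains k' = true := (List.mem_filter.mp hk').2
        have : d1.contains k = true := by
          have hkk : k' = k := congrArg Prod.fst hpair
          rw [hkk] at this; exact this
        simp [h1] at this
      · intro h; simp at h
    · -- k only in d1: symmetric
      simp only [List.filter_cons, h1, h2, if_pos, if_neg, Bool.false_eq_true,
        not_false_iff, List.map_cons]
      constructor
      · intro he
        have hk : (k, d1.get? k) ∈ (ks.filter (fun k => d2.contains k)).map (fun k => (k, d2.get? k)) := by
          rw [← he]; exact List.mem_cons_self
        rcases List.mem_map.mp hk with ⟨k', hk', hpair⟩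
        have : d2.contains k' = true := (List.mem_filter.mp hk').2
        have : d2.contains k = true := by
          have hkk : k' = k := congrArg Prod.fst hpair
          rw [hkk] at this; exact this
        simp [h2] at this
      · intro h; simp at h
    · simp [h1, h2, ih]

-- ===== VERDICT =====
theorem compare_details_spec : Claim_equal_compare_details := by
  intro dict1 dict2 keys _
  unfold Spec_compare_details compare_details compare_details_alt
  dsimp only
  have hfold := pv_fold_eq_empty_iff (PySem.Dict.mk dict1) (PySem.Dict.mk dict2) keys
    PySem.Dict.empty
  have hproj := pv_proj_eq_iff (PySem.Dict.mk dict1) (PySem.Dict.mk dict2) keys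
  split_ifs with hf
  · have := (hfold.mp hf).2
    exact (beq_iff_eq.mpr (hproj.mpr this)).symm
  · rcases hb : ((keys.filter (fun k => (PySem.Dict.mk dict1).contains k)).map (fun k => (k, (PySem.Dict.mk dict1).get? k))
        == (keys.filter (fun k => (PySem.Dict.mk dict2).contains k)).map (fun k => (k, (PySem.Dict.mk dict2).get? k))) with _ | _
    · rfl
    · exact absurd (hfold.mpr ⟨rfl, hproj.mp (beq_iff_eq.mp hb)⟩) hf
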